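-- pv_equiv track=rewrite | github.com/AntonBelski/leetcode_puzzles | 1710_maximum_units_on_a_truck.py | maximumUnits2
-- ===== SOURCE A (Python) =====
-- from heapq import heapify, heappop
-- from typing import List
--
-- def maximumUnits2(box_types: List[List[int]], truck_size: int) -> int:
--     # Heap, Time Complexity - O(n * logn), Space Complexity - O(n)
--     heap = [[-val, size] for size, val in box_types]
--     heapify(heap)
--     rest = truck_size
--     result = 0
--
--     while heap and rest != 0:
--         boxes, size = heappop(heap)
--         count = min(size, rest)
--         result += -boxes * count
--         rest -= count
--
--     return result
-- ===== SOURCE B (Python) =====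
-- from typing import List
--
-- def maximumUnits2(box_types: List[List[int]], truck_size: int) -> int:
--     # Sort once (units descending, size ascending), then one greedy linear pass.
--     rest = truck_size
--     result = 0
--     for size, units in sorted(box_types, key=lambda b: (-b[1], b[0])):
--         if rest == 0:
--             break
--         count = min(size, rest)
--         result += count * units
--         rest -= count
--     return result
-- ===== Notes on version B (the rewrite author's own statement) =====
-- stated objective: simpler
-- what changed: Replaces the heap (heapify + repeated heappop inside the while loop) by a single sort in the heap's pop order (units descending, size ascending) followed by one linear greedy pass with an early break.
import Mathlib
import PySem

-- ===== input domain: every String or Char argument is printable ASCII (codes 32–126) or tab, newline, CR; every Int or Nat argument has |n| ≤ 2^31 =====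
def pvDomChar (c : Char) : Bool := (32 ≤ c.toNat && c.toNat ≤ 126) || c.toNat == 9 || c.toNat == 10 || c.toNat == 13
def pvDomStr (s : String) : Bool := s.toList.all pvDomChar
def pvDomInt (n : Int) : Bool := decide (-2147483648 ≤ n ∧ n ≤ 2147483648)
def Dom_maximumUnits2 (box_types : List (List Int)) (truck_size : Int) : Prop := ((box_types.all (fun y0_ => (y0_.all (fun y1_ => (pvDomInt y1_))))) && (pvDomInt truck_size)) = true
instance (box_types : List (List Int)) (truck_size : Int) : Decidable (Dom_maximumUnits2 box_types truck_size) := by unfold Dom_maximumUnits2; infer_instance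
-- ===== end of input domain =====

-- B replaces A's heap (heapify + repeated heappop) by one sort in the heap's pop order plus a
-- single greedy pass (objective: simpler). Neither program mutates its arguments.

-- ===== PORT A =====
-- Python list `<` (lexicographic; a strict prefix is smaller) — the comparison heapq uses on the `[-val, size]` entries.
def pyListLt : List Int → List Int → Bool
  | [], [] => false
  | [], _ :: _ => true
  | _ :: _, [] => false
  | a :: as, b :: bs => if a < b then true else if b < a then false else pyListLt as bs

-- the minimum of `x :: xs` under `pyListLt` (first minimal occurrence kept)
def heapMinOf (x : List Int) (xs : List (List Int)) : List Int :=
  xs.foldl (fun m y => if pyListLt y m then y else m) x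

lemma heapMinOf_mem (x : List Int) (xs : List (List Int)) : heapMinOf x xs ∈ x :: xs := by
  induction xs generalizing x with
  | nil => simp [heapMinOf]
  | cons y ys ih =>
    have hfold : heapMinOf x (y :: ys) = heapMinOf (if pyListLt y x then y else x) ys := rfl
    rw [hfold]
    rcases List.mem_cons.1 (ih (if pyListLt y x then y else x)) with h' | h'
    · rw [h']; split_ifs <;> simp
    · simp [h']

-- `heapq.heapify` + the `while heap and rest != 0: heappop(heap)` loop, with heappop ported
-- semantically: it returns the minimum element of the heap under Python list comparison and
-- removes one occurrence of it. Exact for every value A observes: CPython's heap pops its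
-- elements in nondecreasing order, and equal elements are indistinguishable values.
def heapLoop : List (List Int) → Int → Int → Int
  | [], _, result => result
  | x :: xs, rest, result =>
    if rest = 0 then result
    else
      let m := heapMinOf x xs                      -- boxes, size = heappop(heap)
      let boxes := PySem.List.pyGetD m 0 0
      let size := PySem.List.pyGetD m 1 0
      let count := min size rest
      heapLoop ((x :: xs).erase m) (rest - count) (result + (-boxes) * count)
termination_by h _ _ => h.length
decreasing_by
  have hm : heapMinOf x xs ∈ x :: xs := heapMinOf_mem x xs
  simp [List.length_erase_of_mem hm]

def maximumUnits2 (box_types : List (List Int)) (truck_size : Int) : Int :=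
  -- heap = [[-val, size] for size, val in box_types]  (the unpacking needs length-2 rows: Pre_)
  let heap := box_types.map (fun b => [-(PySem.List.pyGetD b 1 0), PySem.List.pyGetD b 0 0])
  heapLoop heap truck_size 0

-- ===== PORT B =====
-- for size, units in order: if rest == 0: break; count = min(size, rest); …
def altLoop : List (List Int) → Int → Int → Int
  | [], _, result => result
  | b :: t, rest, result =>
    if rest = 0 then result
    else
      let size := PySem.List.pyGetD b 0 0
      let units := PySem.List.pyGetD b 1 0
      let count := min size rest
      altLoop t (rest - count) (result + count * units)

def maximumUnits2_alt (box_types : List (List Int)) (truck_size : Int) : Int :=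
  -- sorted(box_types, key=lambda b: (-b[1], b[0]))
  let order := PySem.List.sorted2 box_types
      (fun b => -(PySem.List.pyGetD b 1 0)) (fun b => PySem.List.pyGetD b 0 0)
  altLoop order truck_size 0

-- ===== PRECONDITION & SPEC =====
-- Pre_ excludes exactly the inputs where Python A raises: a row of length ≠ 2 makes the
-- unpacking `for size, val in box_types` raise ValueError (B's unpacking raises there too).
def Pre_maximumUnits2 (box_types : List (List Int)) (truck_size : Int) : Prop :=
  ∀ b ∈ box_types, b.length = 2
instance (box_types : List (List Int)) (truck_size : Int) : Decidable (Pre_maximumUnits2 box_types truck_size) := by unfold Pre_maximumUnits2; infer_instance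
def pvWitness_maximumUnits2 : List (List Int) × Int := ([[1, 3], [2, 2]], 4)

def Spec_maximumUnits2 (box_types : List (List Int)) (truck_size : Int) (out : Int) : Prop := out = maximumUnits2_alt box_types truck_size
instance (box_types : List (List Int)) (truck_size : Int) (out : Int) : Decidable (Spec_maximumUnits2 box_types truck_size out) := by unfold Spec_maximumUnits2; infer_instance

-- ===== CLAIM (what is proved, stated in full; the proofs are below) =====
def Claim_equal_maximumUnits2 : Prop := ∀ (box_types : List (List Int)) (truck_size : Int), Dom_maximumUnits2 box_types truck_size → Pre_maximumUnits2 box_types truck_size → Spec_maximumUnits2 box_types truck_size (maximumUnits2 box_types truck_size)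

-- ===== LEMMAS AND PROOFS =====

-- A's heap entry for a row b, and B's sort key for the same row (as a lexicographic pair).
def gA (b : List Int) : List Int := [-(PySem.List.pyGetD b 1 0), PySem.List.pyGetD b 0 0]
def kB (b : List Int) : Int ×ₗ Int := toLex (-(PySem.List.pyGetD b 1 0), PySem.List.pyGetD b 0 0)

lemma pyListLt_irrefl (a : List Int) : pyListLt a a = false := by
  induction a with
  | nil => rfl
  | cons x xs ih => simp [pyListLt, ih]

lemma pyListLt_asymm : ∀ a b : List Int, pyListLt a b = true → pyListLt b a = false := by
  intro a
  induction a with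
  | nil => intro b _; cases b <;> rfl
  | cons x xs ih =>
    intro b hab
    cases b with
    | nil => simp [pyListLt] at hab
    | cons y ys =>
      simp only [pyListLt] at hab ⊢
      split_ifs at hab ⊢ <;> try omega
      all_goals first | rfl | (exact ih ys hab)

lemma pyListLt_le_trans : ∀ a b c : List Int, pyListLt b a = false → pyListLt c b = false → pyListLt c a = false := by
  intro a
  induction a with
  | nil => intro b c _ _; cases c <;> rfl
  | cons x xs ih =>
    intro b c hba hcb
    cases b with
    | nil => simp [pyListLt] at hba
    | cons y ys =>
      cases c with
      | nil => simp [pyListLt] at hcb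
      | cons z zs =>
        simp only [pyListLt] at hba hcb ⊢
        split_ifs at hba hcb ⊢ <;> try omega
        all_goals first | rfl | (exact ih ys zs hba hcb)

lemma heapMinOf_min (x : List Int) (xs : List (List Int)) :
    ∀ z ∈ x :: xs, pyListLt z (heapMinOf x xs) = false := by
  induction xs generalizing x with
  | nil =>
    intro z hz; simp at hz; subst hz
    simpa [heapMinOf] using pyListLt_irrefl z
  | cons y ys ih =>
    intro z hz
    have hfold : heapMinOf x (y :: ys) = heapMinOf (if pyListLt y x then y else x) ys := rfl
    rw [hfold]
    have ih' := ih (if pyListLt y x then y else x)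
    by_cases hyx : pyListLt y x = true
    · rw [if_pos hyx] at ih' ⊢
      have hym : pyListLt y (heapMinOf y ys) = false := ih' y (by simp)
      rcases List.mem_cons.1 hz with rfl | hz'
      · exact pyListLt_le_trans _ y z hym (pyListLt_asymm y z hyx)
      · rcases List.mem_cons.1 hz' with rfl | hz''
        · exact hym
        · exact ih' z (by simp [hz''])
    · rw [if_neg hyx] at ih' ⊢
      have hxm : pyListLt x (heapMinOf x ys) = false := ih' x (by simp)
      rcases List.mem_cons.1 hz with rfl | hz'
      · exact hxm
      · rcases List.mem_cons.1 hz' with rfl | hz''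
        · exact pyListLt_le_trans _ x z hxm (by simpa using hyx)
        · exact ih' z (by simp [hz''])

lemma pyGetD_gA_zero (b : List Int) : PySem.List.pyGetD (gA b) 0 0 = -(PySem.List.pyGetD b 1 0) := by
  simp [gA, PySem.List.pyGetD, PySem.List.pyIdx?, PySem.List.pyGet?]

lemma pyGetD_gA_one (b : List Int) : PySem.List.pyGetD (gA b) 1 0 = PySem.List.pyGetD b 0 0 := by
  simp [gA, PySem.List.pyGetD, PySem.List.pyIdx?, PySem.List.pyGet?]

lemma pyListLt_pair (p q r s : Int) :
    pyListLt [p, q] [r, s] = decide (toLex (p, q) < toLex (r, s)) := by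
  simp only [pyListLt, Prod.Lex.lt_iff]
  by_cases h1 : p < r <;> by_cases h2 : r < p <;> by_cases h3 : q < s <;>
    by_cases h4 : s < q <;> simp [h1, h2, h3, h4] <;> omega

lemma pyListLt_gA (a b : List Int) : pyListLt (gA a) (gA b) = decide (kB a < kB b) := by
  simp only [gA, kB]
  exact pyListLt_pair _ _ _ _

lemma gA_eq_of_kB_eq {a b : List Int} (h : kB a = kB b) : gA a = gA b := by
  simp only [kB, toLex_inj, Prod.mk.injEq] at h
  simp [gA, h.1, h.2]

lemma sorted2_eq_sorted (xs : List (List Int)) :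
    PySem.List.sorted2 xs (fun b => -(PySem.List.pyGetD b 1 0)) (fun b => PySem.List.pyGetD b 0 0)
      = PySem.List.sorted xs kB := by
  have hb : (fun a b : List Int =>
      (decide (-(PySem.List.pyGetD a 1 0) < -(PySem.List.pyGetD b 1 0)) ||
        (!decide (-(PySem.List.pyGetD b 1 0) < -(PySem.List.pyGetD a 1 0)) &&
          decide (PySem.List.pyGetD a 0 0 < PySem.List.pyGetD b 0 0))))
      = (fun a b : List Int => decide (kB a < kB b)) := by
    funext a b
    simp only [kB, Prod.Lex.lt_iff]
    by_cases h1 : -(PySem.List.pyGetD a 1 0) < -(PySem.List.pyGetD b 1 0) <;>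
      by_cases h2 : -(PySem.List.pyGetD b 1 0) < -(PySem.List.pyGetD a 1 0) <;>
        by_cases h3 : PySem.List.pyGetD a 0 0 < PySem.List.pyGetD b 0 0 <;>
          simp [h1, h2, h3] <;> omega
  show List.foldl (fun acc x => PySem.List.insertBy _ x acc) [] xs
      = List.foldl (fun acc x => PySem.List.insertBy _ x acc) [] xs
  rw [hb]

lemma loop_eq : ∀ (ord h : List (List Int)) (rest result : Int),
    h.Perm (ord.map gA) → ord.Pairwise (fun a b => kB a ≤ kB b) →
    heapLoop h rest result = altLoop ord rest result := by
  intro ord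
  induction ord with
  | nil =>
    intro h rest result hp _
    have : h = [] := List.Perm.eq_nil (by simpa using hp)
    subst this; simp [heapLoop, altLoop]
  | cons b t ih =>
    intro h rest result hp hpw
    have hlen : h.length = t.length + 1 := by simpa using hp.length_eq
    have hne : h ≠ [] := by intro e; rw [e] at hlen; simp at hlen
    obtain ⟨x, xs, rfl⟩ := List.exists_cons_of_ne_nil hne
    by_cases hr : rest = 0
    · simp [heapLoop, altLoop, hr]
    · have hm_mem : heapMinOf x xs ∈ x :: xs := heapMinOf_mem x xs
      obtain ⟨c, hc, hgc⟩ := List.mem_map.1 (hp.mem_iff.1 hm_mem)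
      have hgb : gA b ∈ x :: xs := hp.mem_iff.2 (List.mem_map_of_mem (by simp))
      have h1 : pyListLt (gA b) (heapMinOf x xs) = false := heapMinOf_min x xs _ hgb
      have h3 : ¬ kB b < kB c := by
        rw [← hgc, pyListLt_gA] at h1; simpa using h1
      have h2 : kB b ≤ kB c := by
        rcases List.mem_cons.1 hc with rfl | hct
        · exact le_refl _
        · exact (List.pairwise_cons.1 hpw).1 c hct
      have hm_eq : heapMinOf x xs = gA b := by
        rw [← hgc]; exact gA_eq_of_kB_eq (le_antisymm (not_lt.1 h3) h2)
      have hperm' : ((x :: xs).erase (heapMinOf x xs)).Perm (t.map gA) := by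
        have h5 := hp.erase (heapMinOf x xs)
        have h6 : ((b :: t).map gA).erase (heapMinOf x xs) = t.map gA := by
          rw [hm_eq]; simp
        rwa [h6] at h5
      rw [hm_eq] at hperm'
      rw [heapLoop, altLoop]
      simp only [if_neg hr, hm_eq, pyGetD_gA_zero, pyGetD_gA_one, neg_neg]
      rw [mul_comm]
      exact ih _ _ _ hperm' (List.pairwise_cons.1 hpw).2

-- ===== VERDICT (by name: the statement is the Claim_ definition above) =====
theorem maximumUnits2_spec : Claim_equal_maximumUnits2 := by
  intro box_types truck_size _ _
  show maximumUnits2 box_types truck_size = maximumUnits2_alt box_types truck_size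
  unfold maximumUnits2 maximumUnits2_alt
  rw [sorted2_eq_sorted]
  exact loop_eq (PySem.List.sorted box_types kB) _ truck_size 0
    ((PySem.List.sorted_perm box_types kB false).map gA).symm
    (PySem.List.sorted_pairwise box_types kB)
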